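-- pv_equiv track=rewrite | github.com/javatechno/cource | CryptoLab.py | bit_independence_criterion
-- ===== SOURCE A (Python) =====
-- import math
--
-- def function_value(function):
--     values = [ [] for _ in range(len(bin(max(function))[2:]))]
--     for value in function:
--         for function_number in range(len(bin(max(function))[2:])):
--             values[function_number].append(value >> function_number & 1)
--     values.reverse()
--     return values
--
-- def bit_independence_criterion(function):
--     values = function_value(function)
--     g = {1:[0,1],2:[0,2],3:[1,2],4:[0,3],5:[1,3],6:[2,3]}
--     var = [[0] for _ in range(6)]
--     for k in g:
--         for i in range(int(math.log2(len(function)))):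
--             num = 0
--             for j in range(len(function)):
--                  if values[g[k][0]][j] != values[g[k][0]][j^(2**i)] and values[g[k][1]][j] != values[g[k][1]][j^(2**i)]:
--                     num=num+1
--             var[k-1][0]=var[k-1][0]+num
--     return var,g
-- ===== SOURCE B (Python) =====
-- import math
--
-- def bit_independence_criterion(function):
--     bits = len(bin(max(function))[2:])
--     rows = [[v >> f & 1 for v in function] for f in reversed(range(bits))]
--     n = len(function)
--     m = int(math.log2(n))
--     # phase 1: one support set per (output row, shift amount): positions where the row changes
--     supp = [[{j for j in range(n) if row[j] != row[j ^ (1 << i)]} for i in range(m)]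
--             for row in rows]
--     g = {1: [0, 1], 2: [0, 2], 3: [1, 2], 4: [0, 3], 5: [1, 3], 6: [2, 3]}
--     # phase 2: combine the precomputed supports pairwise
--     var = [[sum(1 for i in range(m) for j in supp[a][i] if j in supp[b][i])]
--            for a, b in g.values()]
--     return var, g
-- ===== Notes on version B (the rewrite author's own statement) =====
-- stated objective: alternative
-- what changed: B splits the computation into two phases: it first precomputes, per (output row, shift), the support set of positions where that row changes, then a second combine pass counts, for each of the 6 pairs, the positions of the first row's support that lie in the second row's support, instead of A's single phase that recomputes both rows' differences inside every pair's triple-nested loop.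
import Mathlib
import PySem

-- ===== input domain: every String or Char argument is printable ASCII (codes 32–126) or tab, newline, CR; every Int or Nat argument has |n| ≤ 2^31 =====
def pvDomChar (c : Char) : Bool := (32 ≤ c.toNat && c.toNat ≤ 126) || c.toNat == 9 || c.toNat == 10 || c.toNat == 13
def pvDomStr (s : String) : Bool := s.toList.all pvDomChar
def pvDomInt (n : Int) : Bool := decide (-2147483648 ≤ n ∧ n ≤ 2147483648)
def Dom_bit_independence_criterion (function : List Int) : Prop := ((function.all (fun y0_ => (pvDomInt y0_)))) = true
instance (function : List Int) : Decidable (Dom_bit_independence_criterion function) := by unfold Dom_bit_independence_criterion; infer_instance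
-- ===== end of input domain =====

-- B re-implements A in two phases (build per-(row,shift) support sets, then combine the pairs);
-- same return value on Pre_ (objective: alternative decomposition, no speed claim).

-- shared primitives (these exact Python expressions occur verbatim in Source A and in Source B)
-- Python `value >> f & 1` (exact, including negatives)
def pyBit (v : Int) (f : Nat) : Int := PySem.Int.band (v >>> f) 1

-- Python `len(bin(m)[2:])`: bin(m) via PySem, drop the two leading chars, take the length
def pyBinLen (m : Int) : Nat := ((PySem.Int.pyBin m).toList.drop 2).length

-- Python `max(function)`; raises on [] (excluded by Pre_), the default is never taken inside Pre_
def pyMax (l : List Int) : Int := (PySem.List.max? l (fun x => x)).getD 0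

-- ===== PORT A =====
-- values[a][j] with defaults; inside Pre_ every access A's short-circuit `and` actually evaluates
-- is in range, so the defaults are never the Python-visible value there
def bitAt (vs : List (List Int)) (a : Int) (j : Nat) : Int := (vs.getD a.toNat []).getD j 0

-- inner loop of function_value: for fn in range(rows): values[fn].append(value >> fn & 1)
def fvInner (value : Int) (rows : Nat) (vs : List (List Int)) : List (List Int) :=
  (List.range rows).foldl (fun w fn => w.set fn ((w.getD fn []) ++ [pyBit value fn])) vs

def function_value (function : List Int) : List (List Int) :=
  let rows := pyBinLen (pyMax function)
  let vs := function.foldl (fun w value => fvInner value rows w)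
      ((List.range rows).map (fun _ => ([] : List Int)))
  vs.reverse

-- body of A's `for k in g` loop; k ∈ {1,…,6} (g's literal keys), so (k-1).toNat is exact
def aStep (values : List (List Int)) (n m : Nat) (var : List (List Int)) (kp : Int × List Int) :
    List (List Int) :=
  (List.range m).foldl (fun var i =>
    let num := (List.range n).foldl (fun num j =>
      if bitAt values (kp.2.getD 0 0) j ≠ bitAt values (kp.2.getD 0 0) (j ^^^ 2 ^ i)
          ∧ bitAt values (kp.2.getD 1 0) j ≠ bitAt values (kp.2.getD 1 0) (j ^^^ 2 ^ i)
      then num + 1 else num) (0 : Int)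
    var.set (kp.1 - 1).toNat [(var.getD (kp.1 - 1).toNat []).getD 0 0 + num]) var

def bit_independence_criterion (function : List Int) : List (List Int) × (List (Int × List Int)) :=
  let values := function_value function
  let g : List (Int × List Int) := [(1,[0,1]),(2,[0,2]),(3,[1,2]),(4,[0,3]),(5,[1,3]),(6,[2,3])]
  let var0 : List (List Int) := (List.range 6).map (fun _ => [(0 : Int)])
  let n := function.length
  let m := Nat.log2 n   -- int(math.log2(n)); exact on Pre_ (n a power of two)
  (g.foldl (aStep values n m) var0, g)

-- ===== PORT B =====
-- body of B's per-pair comprehension (phase 2: count first row's support positions inside the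
-- second row's support; the count is independent of the sets' iteration order)
def bStep (supp : List (List (PySem.Set Nat))) (m : Nat) (kp : Int × List Int) : List Int :=
  [((List.range m).foldl (fun total i =>
      total + (((supp.getD (kp.2.getD 0 0).toNat []).getD i PySem.Set.empty).countP
        (fun j => PySem.Set.contains
          ((supp.getD (kp.2.getD 1 0).toNat []).getD i PySem.Set.empty) j) : Int)) (0 : Int))]

def bit_independence_criterion_alt (function : List Int) : List (List Int) × (List (Int × List Int)) :=
  let bits := pyBinLen (pyMax function)
  let values := (List.range bits).reverse.map (fun f => function.map (fun v => pyBit v f))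
  let n := function.length
  let m := Nat.log2 n   -- int(math.log2(n)); exact on Pre_ (n a power of two)
  -- phase 1: one support set per (row, shift)
  let supp : List (List (PySem.Set Nat)) := values.map (fun row =>
    (List.range m).map (fun i =>
      PySem.Set.ofList ((List.range n).filter
        (fun j => decide (row.getD j 0 ≠ row.getD (j ^^^ (1 <<< i)) 0)))))
  let g : List (Int × List Int) := [(1,[0,1]),(2,[0,2]),(3,[1,2]),(4,[0,3]),(5,[1,3]),(6,[2,3])]
  (g.map (bStep supp m), g)

-- ===== PRECONDITION & SPEC =====
-- Pre_ excludes exactly the inputs on which A RAISES: the empty list (ValueError from max), a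
-- non-power-of-two length (j^2**i runs off the rows: IndexError), and inputs of length ≥ 2 whose
-- bin(max) yields fewer than 4 output rows — except that with exactly 3 rows all of which are
-- constant the short-circuit `and` never reaches the missing row 3 and A returns (those inputs,
-- and length-1 inputs, stay INSIDE Pre_ and B matches A's all-zero counts there).
def Pre_bit_independence_criterion (function : List Int) : Prop :=
  function ≠ [] ∧ (∃ k ≤ function.length, function.length = 2 ^ k) ∧
    (4 ≤ pyBinLen (pyMax function) ∨ function.length = 1 ∨
      (pyBinLen (pyMax function) = 3 ∧
        ∀ f ∈ [0, 1, 2], ∀ x ∈ function, pyBit x f = pyBit (function.headD 0) f))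
instance (function : List Int) : Decidable (Pre_bit_independence_criterion function) := by
  unfold Pre_bit_independence_criterion; infer_instance

def pvWitness_bit_independence_criterion : List Int := [8, 9, 10, 11]

def Spec_bit_independence_criterion (function : List Int) (out : List (List Int) × (List (Int × List Int))) : Prop := out = bit_independence_criterion_alt function
instance (function : List Int) (out : List (List Int) × (List (Int × List Int))) : Decidable (Spec_bit_independence_criterion function out) := by unfold Spec_bit_independence_criterion; infer_instance

-- ===== CLAIM (what is proved, stated in full; the proofs are below) =====
def Claim_equal_bit_independence_criterion : Prop := ∀ (function : List Int), Dom_bit_independence_criterion function → Pre_bit_independence_criterion function → Spec_bit_independence_criterion function (bit_independence_criterion function)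

-- ===== LEMMAS AND PROOFS =====

-- proof-side abbreviations (used only in lemma statements below the claim block)
def pvNum (values : List (List Int)) (n : Nat) (kp : Int × List Int) (i : Nat) : Int :=
  (List.range n).foldl (fun num j =>
    if bitAt values (kp.2.getD 0 0) j ≠ bitAt values (kp.2.getD 0 0) (j ^^^ 2 ^ i)
        ∧ bitAt values (kp.2.getD 1 0) j ≠ bitAt values (kp.2.getD 1 0) (j ^^^ 2 ^ i)
    then num + 1 else num) (0 : Int)

def pvSum (values : List (List Int)) (n m : Nat) (kp : Int × List Int) : Int :=
  ((List.range m).map (pvNum values n kp)).sum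

def pvSupp (values : List (List Int)) (n m : Nat) : List (List (PySem.Set Nat)) :=
  values.map (fun row =>
    (List.range m).map (fun i =>
      PySem.Set.ofList ((List.range n).filter
        (fun j => decide (row.getD j 0 ≠ row.getD (j ^^^ (1 <<< i)) 0)))))

-- generic list lemmas
theorem pv_getD_map_range {α : Type} (h : Nat → α) (d : α) {i n : Nat} (hi : i < n) :
    ((List.range n).map h).getD i d = h i := by
  simp [List.getD_eq_getElem?_getD, List.getElem?_map, List.getElem?_range hi]

theorem pv_set_map_range {α : Type} (h : Nat → α) {r n : Nat} (hr : r < n) (y : α) :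
    ((List.range n).map h).set r y = (List.range n).map (fun f => if f = r then y else h f) := by
  apply List.ext_getElem
  · simp
  · intro i hi _
    simp only [List.getElem_set, List.getElem_map, List.getElem_range]
    rcases eq_or_ne i r with h1 | h1
    · subst h1; simp
    · rw [if_neg (fun h => h1 h.symm), if_neg h1]

theorem pv_set_self {α : Type} (vs : List α) (t : Nat) (y d : α) (hlen : t < vs.length)
    (hc : vs.getD t d = y) : vs.set t y = vs := by
  apply List.ext_getElem
  · simp
  · intro i hi _
    simp only [List.getElem_set]
    split_ifs with h1
    · subst h1; rw [← hc, List.getD_eq_getElem vs d hlen]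
    · rfl

theorem pv_getD_set_self {α : Type} (vs : List α) (t : Nat) (y d : α) (hlen : t < vs.length) :
    (vs.set t y).getD t d = y := by
  rw [List.getD_eq_getElem _ d (by simpa using hlen)]
  simp

theorem pv_foldl_count (p : Nat → Prop) [DecidablePred p] (l : List Nat) (acc : Int) :
    l.foldl (fun num j => if p j then num + 1 else num) acc
      = acc + (l.countP (fun j => decide (p j)) : Int) := by
  induction l generalizing acc with
  | nil => simp
  | cons x xs ih =>
    by_cases h : p x
    · simp only [List.foldl_cons, ih, List.countP_cons, decide_eq_true_eq, h, if_true]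
      push_cast
      ring
    · simp only [List.foldl_cons, ih, List.countP_cons, decide_eq_true_eq, h, if_false]
      push_cast
      ring

-- function_value equals B's map form
theorem pv_fv_step (p : List Int) (v : Int) (rows : Nat) {r : Nat} (hr : r ≤ rows) :
    (List.range r).foldl (fun w fn => w.set fn ((w.getD fn []) ++ [pyBit v fn]))
        ((List.range rows).map (fun f => p.map (fun u => pyBit u f)))
      = (List.range rows).map (fun f =>
          if f < r then (p ++ [v]).map (fun u => pyBit u f) else p.map (fun u => pyBit u f)) := by
  induction r with
  | zero => simp
  | succ r ih =>
    rw [List.range_succ, List.foldl_append, ih (Nat.le_of_succ_le hr)]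
    simp only [List.foldl_cons, List.foldl_nil]
    rw [pv_getD_map_range _ _ (Nat.lt_of_succ_le hr), pv_set_map_range _ (Nat.lt_of_succ_le hr)]
    apply List.map_congr_left
    intro f _
    by_cases h1 : f = r
    · subst h1; simp
    · simp only [if_neg h1]
      by_cases h2 : f < r
      · rw [if_pos h2, if_pos (Nat.lt_succ_of_lt h2)]
      · rw [if_neg h2, if_neg (by omega)]

theorem pv_fvInner (p : List Int) (v : Int) (rows : Nat) :
    fvInner v rows ((List.range rows).map (fun f => p.map (fun u => pyBit u f)))
      = (List.range rows).map (fun f => (p ++ [v]).map (fun u => pyBit u f)) := by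
  rw [fvInner, pv_fv_step p v rows (Nat.le_refl rows)]
  apply List.map_congr_left
  intro f hf
  rw [if_pos (List.mem_range.mp hf)]

theorem pv_fv_all (rows : Nat) (l : List Int) : ∀ p : List Int,
    l.foldl (fun w value => fvInner value rows w)
        ((List.range rows).map (fun f => p.map (fun u => pyBit u f)))
      = (List.range rows).map (fun f => (p ++ l).map (fun u => pyBit u f)) := by
  induction l with
  | nil => intro p; simp
  | cons v vs ih =>
    intro p
    rw [List.foldl_cons, pv_fvInner, ih (p ++ [v])]
    simp

theorem pv_values_eq (function : List Int) :
    function_value function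
      = (List.range (pyBinLen (pyMax function))).reverse.map
          (fun f => function.map (fun v => pyBit v f)) := by
  rw [function_value]
  have h0 : ((List.range (pyBinLen (pyMax function))).map (fun _ => ([] : List Int)))
      = (List.range (pyBinLen (pyMax function))).map
          (fun f => ([] : List Int).map (fun u => pyBit u f)) := rfl
  rw [h0, pv_fv_all _ function []]
  simp [List.map_reverse]

-- A's per-key loop body collapsed into a single sum
theorem pv_slot_loop (num : Nat → Int) (t : Nat) (m : Nat) :
    ∀ (vs : List (List Int)) (c : Int), t < vs.length → vs.getD t [] = [c] →
    (List.range m).foldl (fun var i =>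
        var.set t [(var.getD t []).getD 0 0 + num i]) vs
      = vs.set t [c + ((List.range m).map num).sum] := by
  induction m with
  | zero =>
    intro vs c hlen hc
    simp only [List.range_zero, List.foldl_nil, List.map_nil, List.sum_nil, add_zero]
    exact (pv_set_self vs t [c] [] hlen hc).symm
  | succ m ih =>
    intro vs c hlen hc
    rw [List.range_succ, List.foldl_append, ih vs c hlen hc]
    simp only [List.foldl_cons, List.foldl_nil]
    rw [pv_getD_set_self _ _ _ _ hlen, List.set_set]
    simp [add_assoc]

theorem pv_aStep (values : List (List Int)) (n m : Nat) (var : List (List Int))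
    (kp : Int × List Int) (c : Int) (hlen : (kp.1 - 1).toNat < var.length)
    (hc : var.getD (kp.1 - 1).toNat [] = [c]) :
    aStep values n m var kp = var.set (kp.1 - 1).toNat [c + pvSum values n m kp] := by
  rw [aStep, pvSum]
  exact pv_slot_loop (pvNum values n kp) _ m var c hlen hc

theorem pv_getD_map {α β : Type} (f : α → β) (l : List α) (d : β) {i : Nat}
    (h : i < l.length) : (l.map f).getD i d = f l[i] := by
  rw [List.getD_eq_getElem (l.map f) d (by simpa using h)]
  simp

theorem pv_getD_map_out {α β : Type} (f : α → β) (l : List α) (d : β) {i : Nat}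
    (h : ¬ i < l.length) : (l.map f).getD i d = d :=
  List.getD_eq_default _ _ (by simpa using Nat.le_of_not_lt h)

theorem pv_bitAt_out (values : List (List Int)) (a : Int)
    (h : ¬ a.toNat < values.length) (j : Nat) : bitAt values a j = 0 := by
  rw [bitAt, List.getD_eq_default values _ (Nat.le_of_not_lt h)]
  rfl

-- the support set B stores for (row a, shift i)
theorem pv_suppvec (values : List (List Int)) (n m : Nat) (a : Int) {i : Nat} (hi : i < m) :
    ((pvSupp values n m).getD a.toNat []).getD i PySem.Set.empty
      = if a.toNat < values.length then
          (List.range n).filter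
            (fun j => decide (bitAt values a j ≠ bitAt values a (j ^^^ 2 ^ i)))
        else [] := by
  rw [pvSupp]
  by_cases h : a.toNat < values.length
  · rw [if_pos h, pv_getD_map _ values [] h, pv_getD_map_range _ _ hi]
    have hpred : (List.range n).filter
          (fun j => decide (values[a.toNat].getD j 0 ≠ values[a.toNat].getD (j ^^^ 1 <<< i) 0))
        = (List.range n).filter
            (fun j => decide (bitAt values a j ≠ bitAt values a (j ^^^ 2 ^ i))) := by
      apply List.filter_congr
      intro j _
      have hsh : (1 <<< i) = 2 ^ i := by simp [Nat.shiftLeft_eq]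
      rw [hsh, bitAt, bitAt, List.getD_eq_getElem values [] h]
    rw [hpred]
    exact PySem.Set.ofList_eq_self_of_nodup _ (List.nodup_range.filter _)
  · rw [if_neg h, pv_getD_map_out _ values [] h]
    rfl

theorem pv_count_eq (values : List (List Int)) (n m : Nat) (kp : Int × List Int) {i : Nat}
    (hi : i < m) :
    pvNum values n kp i
      = ((((pvSupp values n m).getD (kp.2.getD 0 0).toNat []).getD i PySem.Set.empty).countP
          (fun j => PySem.Set.contains
            (((pvSupp values n m).getD (kp.2.getD 1 0).toNat []).getD i PySem.Set.empty) j)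
          : Int) := by
  have hnum : pvNum values n kp i
      = ((List.range n).countP (fun j =>
          decide (bitAt values (kp.2.getD 0 0) j ≠ bitAt values (kp.2.getD 0 0) (j ^^^ 2 ^ i)
            ∧ bitAt values (kp.2.getD 1 0) j ≠ bitAt values (kp.2.getD 1 0) (j ^^^ 2 ^ i))) : Int) := by
    rw [pvNum, pv_foldl_count]
    simp
  rw [hnum, pv_suppvec values n m _ hi, pv_suppvec values n m _ hi]
  by_cases ha : (kp.2.getD 0 0).toNat < values.length
  · by_cases hb : (kp.2.getD 1 0).toNat < values.length
    · rw [if_pos ha, if_pos hb, List.countP_filter]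
      norm_cast
      apply List.countP_congr
      intro j hj
      have hjn : j < n := List.mem_range.mp hj
      simp only [PySem.Set.contains_eq_listContains, List.contains_iff_mem, List.mem_filter,
        List.mem_range, Bool.and_eq_true, decide_eq_true_eq]
      tauto
    · rw [if_pos ha, if_neg hb]
      have h1 : ∀ j, bitAt values (kp.2.getD 1 0) j = 0 := pv_bitAt_out values _ hb
      simp only [List.getD_eq_getElem?_getD] at h1
      simp [PySem.Set.contains_eq_listContains]
      intro j _ _
      rw [h1, h1]
  · rw [if_neg ha]
    have h0 : ∀ j, bitAt values (kp.2.getD 0 0) j = 0 := pv_bitAt_out values _ ha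
    simp only [List.getD_eq_getElem?_getD] at h0
    simp [PySem.Set.contains_eq_listContains]
    intro j _ hne
    rw [h0, h0] at hne
    exact absurd rfl hne

theorem pv_bStep (values : List (List Int)) (n m : Nat) (kp : Int × List Int) :
    bStep (pvSupp values n m) m kp = [0 + pvSum values n m kp] := by
  rw [bStep, pvSum]
  have : ∀ r : Nat, r ≤ m →
      (List.range r).foldl (fun total i =>
        total + ((((pvSupp values n m).getD (kp.2.getD 0 0).toNat []).getD i PySem.Set.empty).countP
          (fun j => PySem.Set.contains
            (((pvSupp values n m).getD (kp.2.getD 1 0).toNat []).getD i PySem.Set.empty) j) : Int))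
        (0 : Int)
      = 0 + ((List.range r).map (pvNum values n kp)).sum := by
    intro r hr
    induction r with
    | zero => simp
    | succ r ih =>
      rw [List.range_succ, List.foldl_append, List.map_append, ih (Nat.le_of_succ_le hr)]
      simp only [List.foldl_cons, List.foldl_nil, List.map_cons, List.map_nil, List.sum_append,
        List.sum_cons, List.sum_nil]
      rw [pv_count_eq values n m kp (Nat.lt_of_succ_le hr)]
      ring
  rw [this m (Nat.le_refl m)]

theorem pv_afold (values : List (List Int)) (n m : Nat) :
    [((1:Int),[(0:Int),1]),(2,[0,2]),(3,[1,2]),(4,[0,3]),(5,[1,3]),(6,[2,3])].foldl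
        (aStep values n m) ((List.range 6).map (fun _ => [(0 : Int)]))
      = [((1:Int),[(0:Int),1]),(2,[0,2]),(3,[1,2]),(4,[0,3]),(5,[1,3]),(6,[2,3])].map
          (fun kp => [0 + pvSum values n m kp]) := by
  have h0 : ((List.range 6).map (fun _ => [(0 : Int)]))
      = [[(0:Int)],[0],[0],[0],[0],[0]] := by rfl
  have e1 : aStep values n m [[0],[0],[0],[0],[0],[0]] ((1:Int),[(0:Int),1]) = [[0 + pvSum values n m ((1:Int),[(0:Int),1])],[0],[0],[0],[0],[0]] := by
    rw [pv_aStep values n m _ _ 0 (by norm_num) rfl]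
    rfl
  have e2 : aStep values n m [[0 + pvSum values n m ((1:Int),[(0:Int),1])],[0],[0],[0],[0],[0]] ((2:Int),[0,2]) = [[0 + pvSum values n m ((1:Int),[(0:Int),1])],[0 + pvSum values n m ((2:Int),[0,2])],[0],[0],[0],[0]] := by
    rw [pv_aStep values n m _ _ 0 (by norm_num) rfl]
    rfl
  have e3 : aStep values n m [[0 + pvSum values n m ((1:Int),[(0:Int),1])],[0 + pvSum values n m ((2:Int),[0,2])],[0],[0],[0],[0]] ((3:Int),[1,2]) = [[0 + pvSum values n m ((1:Int),[(0:Int),1])],[0 + pvSum values n m ((2:Int),[0,2])],[0 + pvSum values n m ((3:Int),[1,2])],[0],[0],[0]] := by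
    rw [pv_aStep values n m _ _ 0 (by norm_num) rfl]
    rfl
  have e4 : aStep values n m [[0 + pvSum values n m ((1:Int),[(0:Int),1])],[0 + pvSum values n m ((2:Int),[0,2])],[0 + pvSum values n m ((3:Int),[1,2])],[0],[0],[0]] ((4:Int),[0,3]) = [[0 + pvSum values n m ((1:Int),[(0:Int),1])],[0 + pvSum values n m ((2:Int),[0,2])],[0 + pvSum values n m ((3:Int),[1,2])],[0 + pvSum values n m ((4:Int),[0,3])],[0],[0]] := by
    rw [pv_aStep values n m _ _ 0 (by norm_num) rfl]
    rfl
  have e5 : aStep values n m [[0 + pvSum values n m ((1:Int),[(0:Int),1])],[0 + pvSum values n m ((2:Int),[0,2])],[0 + pvSum values n m ((3:Int),[1,2])],[0 + pvSum values n m ((4:Int),[0,3])],[0],[0]] ((5:Int),[1,3]) = [[0 + pvSum values n m ((1:Int),[(0:Int),1])],[0 + pvSum values n m ((2:Int),[0,2])],[0 + pvSum values n m ((3:Int),[1,2])],[0 + pvSum values n m ((4:Int),[0,3])],[0 + pvSum values n m ((5:Int),[1,3])],[0]] := by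
    rw [pv_aStep values n m _ _ 0 (by norm_num) rfl]
    rfl
  have e6 : aStep values n m [[0 + pvSum values n m ((1:Int),[(0:Int),1])],[0 + pvSum values n m ((2:Int),[0,2])],[0 + pvSum values n m ((3:Int),[1,2])],[0 + pvSum values n m ((4:Int),[0,3])],[0 + pvSum values n m ((5:Int),[1,3])],[0]] ((6:Int),[2,3]) = [[0 + pvSum values n m ((1:Int),[(0:Int),1])],[0 + pvSum values n m ((2:Int),[0,2])],[0 + pvSum values n m ((3:Int),[1,2])],[0 + pvSum values n m ((4:Int),[0,3])],[0 + pvSum values n m ((5:Int),[1,3])],[0 + pvSum values n m ((6:Int),[2,3])]] := by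
    rw [pv_aStep values n m _ _ 0 (by norm_num) rfl]
    rfl
  rw [h0]
  simp only [List.foldl_cons, List.foldl_nil, List.map_cons, List.map_nil]
  rw [e1, e2, e3, e4, e5, e6]

-- ===== VERDICT (by name: the statement is the Claim_ definition above) =====
theorem bit_independence_criterion_spec : Claim_equal_bit_independence_criterion := by
  intro function _ _
  unfold Spec_bit_independence_criterion
  simp only [bit_independence_criterion, bit_independence_criterion_alt]
  rw [pv_values_eq, pv_afold]
  rw [show (((List.range (pyBinLen (pyMax function))).reverse.map
      (fun f => function.map (fun v => pyBit v f))).map (fun row =>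
        (List.range (Nat.log2 function.length)).map (fun i =>
          PySem.Set.ofList ((List.range function.length).filter
            (fun j => decide (row.getD j 0 ≠ row.getD (j ^^^ (1 <<< i)) 0))))))
    = pvSupp ((List.range (pyBinLen (pyMax function))).reverse.map
        (fun f => function.map (fun v => pyBit v f))) function.length
        (Nat.log2 function.length) from rfl]
  rw [Prod.mk.injEq]
  refine ⟨?_, rfl⟩
  apply List.map_congr_left
  intro kp _
  exact (pv_bStep _ function.length (Nat.log2 function.length) kp).symm
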